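-- pv_equiv track=rewrite | github.com/raylfli/advent_of_code | 2024/aoc2024/solutions/d03.py | _instruction_generator
-- ===== SOURCE A (Python) =====
-- def _instruction_generator(s: str) -> str:
--     """
--     Yields characters from the instruction if they are outside of don't()/do() blocks.
--     """
--     enable = True
--     for i, c in enumerate(s):
--         if s[i : i + 7] == "don't()":
--             enable = False
--         elif s[i : i + 4] == "do()":
--             enable = True
--
--         if enable:
--             yield c
-- ===== SOURCE B (Python) =====
-- def _instruction_generator(s: str) -> str:
--     """
--     Yields characters from the instruction if they are outside of don't()/do() blocks.
--     """
--     chunks = s.split("don't()")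
--     yield from chunks[0]
--     for chunk in chunks[1:]:
--         i = chunk.find("do()")
--         if i != -1:
--             yield from chunk[i:]
-- ===== Notes on version B (the rewrite author's own statement) =====
-- stated objective: faster
-- what changed: A keeps an enable flag and compares a freshly built 7-char slice at every single index; B splits the string once on the disable marker and, for each later chunk, yields only the suffix from the first enable marker located with str.find, yielding chunk 0 whole.
import Mathlib
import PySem

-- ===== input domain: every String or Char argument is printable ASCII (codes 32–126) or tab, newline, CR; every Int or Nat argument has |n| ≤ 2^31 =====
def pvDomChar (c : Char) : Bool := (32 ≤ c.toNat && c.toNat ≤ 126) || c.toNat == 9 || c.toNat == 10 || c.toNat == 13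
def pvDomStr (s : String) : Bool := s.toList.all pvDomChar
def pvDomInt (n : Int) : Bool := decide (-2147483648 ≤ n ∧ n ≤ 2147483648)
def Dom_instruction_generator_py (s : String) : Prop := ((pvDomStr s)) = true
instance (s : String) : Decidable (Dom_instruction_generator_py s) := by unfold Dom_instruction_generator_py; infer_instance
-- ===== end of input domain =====

-- B replaces A's per-character enable/disable scan (a 7-char slice comparison at every index)
-- by one split on "don't()" plus one find of "do()" per disabled chunk; objective: simpler
-- decomposition. Both Pythons are generators; their yielded one-character strings are
-- collected in order as a List String.

-- ===== PORT A =====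
-- A: for i, c in enumerate(s): test s[i:i+7] == "don't()" / s[i:i+4] == "do()", keep the
-- enable flag in the fold state; 'yield c' appends the one-character string.
def instruction_generator_py (s : String) : List String :=
  ((PySem.List.enumerate s.toList 0).foldl
    (fun (st : Bool × List String) (p : Int × Char) =>
      let e : Bool :=
        if PySem.List.slice s.toList (some p.1) (some (p.1 + 7)) = "don't()".toList then false
        else if PySem.List.slice s.toList (some p.1) (some (p.1 + 4)) = "do()".toList then true
        else st.1
      (e, if e then st.2 ++ [String.ofList [p.2]] else st.2))
    (true, [])).2

-- ===== PORT B =====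
-- B: chunks = s.split("don't()"); yield from chunks[0]; for each later chunk,
-- i = chunk.find("do()"); if i != -1: yield from chunk[i:].
def instruction_generator_py_alt (s : String) : List String :=
  match PySem.Chars.splitOn s.toList "don't()".toList with
  | [] => []   -- unreachable: split with a nonempty separator returns at least one chunk
  | c0 :: cs =>
      c0.map (fun c => String.ofList [c]) ++
      cs.flatMap (fun ch =>
        let i := PySem.Chars.find ch "do()".toList
        if i = -1 then []
        else (PySem.List.slice ch (some i) none).map (fun c => String.ofList [c]))

-- ===== PRECONDITION & SPEC =====
def Spec_instruction_generator_py (s : String) (out : List String) : Prop := out = instruction_generator_py_alt s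
instance (s : String) (out : List String) : Decidable (Spec_instruction_generator_py s out) := by unfold Spec_instruction_generator_py; infer_instance

-- ===== CLAIM (what is proved, stated in full; the proofs are below) =====
def Claim_equal_instruction_generator_py : Prop := ∀ (s : String), Dom_instruction_generator_py s → Spec_instruction_generator_py s (instruction_generator_py s)

-- ===== LEMMAS AND PROOFS =====

-- Suffix-recursion view of A's scan: at the suffix starting at i, s[i:i+7] is (take 7).
def goA : Bool → List Char → List String
  | _, [] => []
  | e, c :: rest =>
    let e' : Bool :=
      if "don't()".toList.isPrefixOf (c :: rest) then false
      else if "do()".toList.isPrefixOf (c :: rest) then true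
      else e
    (if e' then [String.ofList [c]] else []) ++ goA e' rest

-- Structural view of s.split("don't()"): (first chunk, later chunks).
def splitRec : List Char → List Char × List (List Char)
  | [] => ([], [])
  | c :: rest =>
    if "don't()".toList.isPrefixOf (c :: rest) then
      let p := splitRec (List.drop 7 (c :: rest))
      ([], p.1 :: p.2)
    else
      let p := splitRec rest
      (c :: p.1, p.2)
termination_by l => l.length
decreasing_by all_goals simp only [List.length_drop, List.length_cons]; omega

-- Structural view of chunk.find("do()").
def findRec : List Char → Option Nat
  | [] => none
  | c :: rest =>
    if "do()".toList.isPrefixOf (c :: rest) then some 0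
    else (findRec rest).map (· + 1)

def chunkOut (ch : List Char) : List String :=
  match findRec ch with
  | none => []
  | some k => (ch.drop k).map (fun c => String.ofList [c])

def handleC (cs : List (List Char)) : List String := cs.flatMap chunkOut

def Ben (l : List Char) : List String :=
  ((splitRec l).1.map (fun c => String.ofList [c])) ++ handleC (splitRec l).2

def Bdis (l : List Char) : List String :=
  chunkOut (splitRec l).1 ++ handleC (splitRec l).2

lemma splitRec_fst_prefix (l : List Char) : (splitRec l).1 <+: l := by
  induction l using splitRec.induct with
  | case1 => simp [splitRec]
  | case2 c rest h ih => simp only [splitRec]; rw [if_pos h]; exact List.nil_prefix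
  | case3 c rest h ih =>
      simp only [splitRec]; rw [if_neg h]
      simpa [List.cons_prefix_cons] using ih

lemma find_go_eq (l : List Char) (k : Nat) :
    PySem.Chars.find.go "do()".toList l k =
      (match findRec l with | none => -1 | some j => ((k + j : Nat) : Int)) := by
  induction l generalizing k with
  | nil => simp [PySem.Chars.find.go, findRec]
  | cons c rest ih =>
      rw [PySem.Chars.find.go, findRec]
      by_cases h : "do()".toList.isPrefixOf (c :: rest) = true
      · rw [if_pos h, if_pos h]; simp
      · rw [if_neg h, if_neg h, ih]
        cases hr : findRec rest
        · simp
        · simp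
          ring

lemma find_eq (ch : List Char) :
    PySem.Chars.find ch "do()".toList =
      (match findRec ch with | none => -1 | some j => ((j : Nat) : Int)) := by
  rw [PySem.Chars.find, find_go_eq]; cases h : findRec ch <;> simp

lemma splitOn_go_eq (fuel : Nat) : ∀ (l cur : List Char) (acc : List (List Char)),
    l.length < fuel →
    PySem.Chars.splitOn.go "don't()".toList fuel l cur acc =
      acc.reverse ++ (cur.reverse ++ (splitRec l).1) :: (splitRec l).2 := by
  induction fuel with
  | zero => intro l cur acc h; omega
  | succ n ih =>
      intro l cur acc h
      cases l with
      | nil => simp [PySem.Chars.splitOn.go, splitRec]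
      | cons c rest =>
          rw [PySem.Chars.splitOn.go]
          by_cases hp : "don't()".toList.isPrefixOf (c :: rest) = true
          · rw [if_pos hp, ih _ _ _ (by simp at h ⊢; omega)]
            simp only [splitRec]; rw [if_pos hp]
            simp
          · rw [if_neg hp, ih _ _ _ (by simp at h ⊢; omega)]
            simp only [splitRec]; rw [if_neg hp]
            simp

lemma splitOn_eq (l : List Char) :
    PySem.Chars.splitOn l "don't()".toList = (splitRec l).1 :: (splitRec l).2 := by
  rw [PySem.Chars.splitOn, splitOn_go_eq _ _ _ _ (by omega)]
  simp

lemma alt_eq_Ben (s : String) : instruction_generator_py_alt s = Ben s.toList := by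
  rw [instruction_generator_py_alt, splitOn_eq]
  dsimp only
  rw [Ben, handleC]
  congr 1
  apply List.flatMap_congr
  intro ch _
  rw [find_eq]
  cases hf : findRec ch with
  | none => simp [chunkOut, hf]
  | some k =>
      simp only [chunkOut, hf]
      rw [if_neg (by simp), PySem.List.slice_from_natCast]

lemma slice_eq_iff_prefix (full t p : List Char) (j : Nat) (b : Int) (hd : full.drop j = t)
    (hb : b = (j : Int) + (p.length : Int)) :
    (PySem.List.slice full (some (j : Int)) (some b) = p) ↔ (p.isPrefixOf t = true) := by
  subst hb
  rw [PySem.List.slice_natCast_add, hd, List.isPrefixOf_iff_prefix, List.prefix_iff_eq_take]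
  exact eq_comm

lemma foldA (full : List Char) (t : List Char) :
    ∀ (j : Nat), full.drop j = t → ∀ (e : Bool) (acc : List String),
    ((PySem.List.enumerate t (j : Int)).foldl
      (fun (st : Bool × List String) (p : Int × Char) =>
        let e : Bool :=
          if PySem.List.slice full (some p.1) (some (p.1 + 7)) = "don't()".toList then false
          else if PySem.List.slice full (some p.1) (some (p.1 + 4)) = "do()".toList then true
          else st.1
        (e, if e then st.2 ++ [String.ofList [p.2]] else st.2))
      (e, acc)).2 = acc ++ goA e t := by
  induction t with
  | nil => intro j hd e acc; simp [PySem.List.enumerate_nil, goA]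
  | cons c rest ih =>
      intro j hd e acc
      rw [PySem.List.enumerate_cons, List.foldl_cons]
      have h1 : ((j : Int) + 1) = ((j + 1 : Nat) : Int) := by push_cast; ring
      have hd1 : full.drop (j + 1) = rest := by
        have := congrArg (List.drop 1) hd
        rw [List.drop_drop] at this
        simpa [Nat.add_comm 1 j] using this
      have h7 := slice_eq_iff_prefix full (c :: rest) "don't()".toList j ((j : Int) + 7) hd
        (by have h : ("don't()".toList.length : Int) = 7 := rfl; rw [h])
      have h4 := slice_eq_iff_prefix full (c :: rest) "do()".toList j ((j : Int) + 4) hd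
        (by have h : ("do()".toList.length : Int) = 4 := rfl; rw [h])
      rw [h1, ih (j + 1) hd1]
      rw [goA]
      dsimp only
      rw [if_congr h7 rfl rfl, if_congr (iff_of_eq rfl) rfl (if_congr h4 rfl rfl)]
      generalize (if "don't()".toList.isPrefixOf (c :: rest) = true then false
        else if "do()".toList.isPrefixOf (c :: rest) = true then true else e) = E
      cases E <;> simp

lemma a_eq_goA (s : String) : instruction_generator_py s = goA true s.toList := by
  rw [instruction_generator_py]
  have h0 : (0 : Int) = ((0 : Nat) : Int) := rfl
  rw [h0, foldA s.toList s.toList 0 (by simp) true []]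
  simp

lemma main_equiv (l : List Char) : goA true l = Ben l ∧ goA false l = Bdis l := by
  suffices H : ∀ n (l : List Char), l.length ≤ n → (goA true l = Ben l ∧ goA false l = Bdis l) from
    H l.length l le_rfl
  intro n
  induction n with
  | zero =>
      intro l hl
      have : l = [] := List.length_eq_zero_iff.mp (Nat.le_zero.mp hl)
      subst this
      simp [goA, Ben, Bdis, splitRec, handleC, chunkOut, findRec]
  | succ n ih =>
      intro l hl
      by_cases h7 : "don't()".toList.isPrefixOf l = true
      · obtain ⟨u, rfl⟩ : ∃ u, l = 'd'::'o'::'n'::'\''::'t'::'('::')'::u := by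
          rw [List.isPrefixOf_iff_prefix] at h7
          obtain ⟨u, hu⟩ := h7
          exact ⟨u, by rw [← hu]; rfl⟩
        have key : ∀ e, goA e ('d'::'o'::'n'::'\''::'t'::'('::')'::u) = goA false u := by
          intro e; simp [goA]
        have hsplit : splitRec ('d'::'o'::'n'::'\''::'t'::'('::')'::u) =
            ([], (splitRec u).1 :: (splitRec u).2) := by
          rw [splitRec, if_pos (by simp [List.isPrefixOf])]
          rfl
        obtain ⟨IH1, IH2⟩ := ih u (by simp at hl; omega)
        refine ⟨?_, ?_⟩
        · rw [key true, Ben, hsplit, IH2, Bdis, handleC]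
          simp [handleC]
        · rw [key false, Bdis, hsplit, IH2, Bdis, handleC]
          simp [handleC, chunkOut, findRec]
      · by_cases h4 : "do()".toList.isPrefixOf l = true
        · obtain ⟨u, rfl⟩ : ∃ u, l = 'd'::'o'::'('::')'::u := by
            rw [List.isPrefixOf_iff_prefix] at h4
            obtain ⟨u, hu⟩ := h4
            exact ⟨u, by rw [← hu]; rfl⟩
          have key : ∀ e, goA e ('d'::'o'::'('::')'::u) =
              String.ofList ['d'] :: String.ofList ['o'] :: String.ofList ['('] ::
                String.ofList [')'] :: goA true u := by
            intro e; simp [goA]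
          have hsplit : splitRec ('d'::'o'::'('::')'::u) =
              ('d'::'o'::'('::')'::(splitRec u).1, (splitRec u).2) := by
            rw [splitRec, if_neg h7]
            rw [splitRec, if_neg (by simp [List.isPrefixOf])]
            rw [splitRec, if_neg (by simp [List.isPrefixOf])]
            rw [splitRec, if_neg (by simp [List.isPrefixOf])]
          obtain ⟨IH1, IH2⟩ := ih u (by simp at hl; omega)
          have hfind : findRec ('d'::'o'::'('::')'::(splitRec u).1) = some 0 := by
            rw [findRec, if_pos (by simp [List.isPrefixOf])]
          refine ⟨?_, ?_⟩
          · rw [key true, Ben, hsplit, IH1, Ben]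
            simp
          · rw [key false, Bdis, hsplit, chunkOut, hfind, IH1, Ben]
            simp
        · cases l with
          | nil => simp [goA, Ben, Bdis, splitRec, handleC, chunkOut, findRec]
          | cons c rest =>
              have hsplit : splitRec (c :: rest) = (c :: (splitRec rest).1, (splitRec rest).2) := by
                rw [splitRec, if_neg h7]
              obtain ⟨IH1, IH2⟩ := ih rest (by simp at hl; omega)
              have key : ∀ e, goA e (c :: rest) =
                  (if e then [String.ofList [c]] else []) ++ goA e rest := by
                intro e; rw [goA]; rw [if_neg h7, if_neg h4]
              have hnp : ¬ "do()".toList.isPrefixOf (c :: (splitRec rest).1) = true := by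
                intro hp
                apply h4
                rw [List.isPrefixOf_iff_prefix] at hp ⊢
                exact hp.trans (List.cons_prefix_cons.mpr ⟨rfl, splitRec_fst_prefix rest⟩)
              have hfind : findRec (c :: (splitRec rest).1) =
                  (findRec (splitRec rest).1).map (· + 1) := by
                rw [findRec, if_neg hnp]
              refine ⟨?_, ?_⟩
              · rw [key true, Ben, hsplit, IH1, Ben]
                simp
              · rw [key false, Bdis, hsplit, IH2, Bdis]
                have : chunkOut (c :: (splitRec rest).1) = chunkOut (splitRec rest).1 := by
                  cases hf : findRec (splitRec rest).1 with
                  | none => simp [chunkOut, hfind, hf]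
                  | some k => simp [chunkOut, hfind, hf]
                rw [this]
                simp

-- ===== VERDICT (by name: the statement is the Claim_ definition above) =====
theorem instruction_generator_py_spec : Claim_equal_instruction_generator_py := by
  intro s _
  show instruction_generator_py s = instruction_generator_py_alt s
  rw [a_eq_goA, alt_eq_Ben, (main_equiv s.toList).1]
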